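-- pv_equiv track=rewrite | github.com/Ashiq-am/Path-of-Python | 3.Data Types/Arrays Set 1 and Set 2/Prefix/Minimum count of elements required to obtain the given Array by repeated mirror operations/Minimum count of elements required to obtain the given Array by repeated mirror operations.py | minimumrequired
-- ===== SOURCE A (Python) =====
-- def minimumrequired(A, N):
--     # Initialize K
--     K = N
--
--     while (K > 0):
--
--         # Odd length array
--         # cannot be formed by
--         # mirror operation
--         if (K % 2) == 1:
--             ans = K
--             break
--
--         ispalindrome = 1
--
--         # Check if prefix of
--         # length K is palindrome
--         for i in range(0, K // 2):
--
--             # Check if not a palindrome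
--             if (A[i] != A[K - 1 - i]):
--                 ispalindrome = 0
--
--         # If found to be palindrome
--         if (ispalindrome == 1):
--             ans = K // 2
--             K = K // 2
--
--         # Otherwise
--         else:
--             ans = K
--             break
--
--     # Return the final answer
--     return ans
-- ===== SOURCE B (Python) =====
-- def minimumrequired(A, N):
--     # Recurrence over the prefix length: an odd prefix can never be produced
--     # by mirroring; an even prefix works iff it is a palindrome, in which case
--     # the answer is that of the halved prefix.
--     if N % 2 == 1:
--         return N
--     if all(A[i] == A[N - 1 - i] for i in range(N // 2)):
--         return minimumrequired(A, N // 2)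
--     return N
-- ===== Notes on version B (the rewrite author's own statement) =====
-- stated objective: simpler
-- what changed: Replaced the while-loop with mutable K/ans/ispalindrome state by a direct recursion on the halved prefix length, with the palindrome check as a single all(...) expression.
import Mathlib
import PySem

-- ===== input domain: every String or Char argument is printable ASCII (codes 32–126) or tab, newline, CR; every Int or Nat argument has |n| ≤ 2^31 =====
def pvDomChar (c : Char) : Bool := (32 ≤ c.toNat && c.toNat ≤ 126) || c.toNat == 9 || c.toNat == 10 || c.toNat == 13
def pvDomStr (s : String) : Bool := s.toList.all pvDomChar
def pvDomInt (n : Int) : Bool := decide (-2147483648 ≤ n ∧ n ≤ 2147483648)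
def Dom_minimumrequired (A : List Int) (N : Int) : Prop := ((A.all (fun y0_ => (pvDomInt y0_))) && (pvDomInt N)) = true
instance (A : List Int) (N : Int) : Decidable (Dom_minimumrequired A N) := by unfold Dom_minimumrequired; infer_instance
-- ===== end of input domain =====

-- B replaces A's while-loop over mutable K/ans/ispalindrome state by a direct recursion
-- on the halved prefix length (objective: simpler).

-- ===== PORT A =====
-- the while loop of A: state is K and the last value assigned to ans
-- (ans is unassigned before the first iteration; inside Pre_ the loop always
-- exits via a break, so the fallback 'ans' of the exit path is never returned)
def minimumrequiredGo (A : List Int) (K : Int) (ans : Int) : Int :=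
  if _hK : 0 < K then
    if PySem.Int.mod K 2 == 1 then K
    else
      -- for i in range(0, K // 2): if A[i] != A[K-1-i]: ispalindrome = 0
      let ispalindrome : Int :=
        (PySem.List.pyRange 0 (PySem.Int.floordiv K 2) 1).foldl
          (fun acc i =>
            if PySem.List.pyGetD A i 0 ≠ PySem.List.pyGetD A (K - 1 - i) 0 then 0 else acc) 1
      if ispalindrome == 1 then
        minimumrequiredGo A (PySem.Int.floordiv K 2) (PySem.Int.floordiv K 2)
      else K
  else ans
termination_by K.toNat
decreasing_by
  have h2 : PySem.Int.floordiv K 2 = K / 2 := PySem.Int.floordiv_eq_ediv_of_pos (by omega)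
  rw [h2]; omega

def minimumrequired (A : List Int) (N : Int) : Int :=
  -- K = N; ans unassigned, modelled by the loop-exit fallback 0 (unreachable inside Pre_)
  minimumrequiredGo A N 0

-- ===== PORT B =====
def minimumrequired_alt (A : List Int) (N : Int) : Int :=
  if hodd : PySem.Int.mod N 2 == 1 then N
  else if (PySem.List.pyRange 0 (PySem.Int.floordiv N 2) 1).all
      (fun i => PySem.List.pyGetD A i 0 == PySem.List.pyGetD A (N - 1 - i) 0) then
    -- totality guard: Python B does not terminate at N = 0 (outside Pre_)
    if _hz : N = 0 then 0 else minimumrequired_alt A (PySem.Int.floordiv N 2)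
  else N
termination_by N.natAbs
decreasing_by
  have h1 : PySem.Int.floordiv N 2 * 2 + PySem.Int.mod N 2 = N :=
    PySem.Int.floordiv_mul_add_mod N 2
  have h2 : PySem.Int.mod N 2 = 0 ∨ PySem.Int.mod N 2 = 1 := by
    have := PySem.Int.mod_eq_emod_of_pos (a := N) (b := 2) (by omega)
    omega
  have h3 : PySem.Int.mod N 2 = 0 := by
    rcases h2 with h | h
    · exact h
    · exact absurd (by rw [h]; decide) hodd
  omega

-- ===== PRECONDITION & SPEC =====
-- Pre_ excludes exactly the inputs where A raises: N ≤ 0 (the loop body never runs and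
-- 'ans' is unbound → UnboundLocalError), and even N > len(A) (the palindrome scan
-- indexes A[N-1] → IndexError).
def Pre_minimumrequired (A : List Int) (N : Int) : Prop :=
  0 < N ∧ (PySem.Int.mod N 2 = 1 ∨ N ≤ (A.length : Int))
instance (A : List Int) (N : Int) : Decidable (Pre_minimumrequired A N) := by
  unfold Pre_minimumrequired; infer_instance
def pvWitness_minimumrequired : List Int × Int := ([1, 1], 2)

def Spec_minimumrequired (A : List Int) (N : Int) (out : Int) : Prop := out = minimumrequired_alt A N
instance (A : List Int) (N : Int) (out : Int) : Decidable (Spec_minimumrequired A N out) := by unfold Spec_minimumrequired; infer_instance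

-- ===== CLAIM (what is proved, stated in full; the proofs are below) =====
def Claim_equal_minimumrequired : Prop := ∀ (A : List Int) (N : Int), Dom_minimumrequired A N → Pre_minimumrequired A N → Spec_minimumrequired A N (minimumrequired A N)

-- ===== LEMMAS AND PROOFS =====

-- A's ispalindrome flag equals 1 iff every position matches
theorem foldl_flag_eq (f g : Int → Int) (l : List Int) (s : Int) :
    l.foldl (fun acc i => if f i ≠ g i then 0 else acc) s
      = if l.all (fun i => f i == g i) then s else 0 := by
  induction l generalizing s with
  | nil => simp
  | cons x xs ih =>
    simp only [List.foldl_cons, List.all_cons]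
    by_cases hx : f x = g x
    · rw [if_neg (by simp [hx]), ih]
      simp [hx]
    · rw [if_pos (by simp [hx]), ih]
      simp [hx]

-- the loop agrees with the recursion for every positive K, regardless of ans
theorem go_eq_alt (A : List Int) (n : Nat) :
    ∀ K ans, K.toNat ≤ n → 0 < K →
      minimumrequiredGo A K ans = minimumrequired_alt A K := by
  induction n with
  | zero => intro K ans hle hK; omega
  | succ n ih =>
    intro K ans hle hK
    rw [minimumrequiredGo, minimumrequired_alt]
    rw [dif_pos hK]
    by_cases hodd : (PySem.Int.mod K 2 == 1) = true
    · rw [if_pos hodd, dif_pos hodd]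
    · rw [if_neg hodd, dif_neg hodd]
      rw [foldl_flag_eq (fun i => PySem.List.pyGetD A i 0)
            (fun i => PySem.List.pyGetD A (K - 1 - i) 0)]
      have hmod : PySem.Int.mod K 2 = K % 2 := PySem.Int.mod_eq_emod_of_pos (by omega)
      have hdiv : PySem.Int.floordiv K 2 = K / 2 := PySem.Int.floordiv_eq_ediv_of_pos (by omega)
      have hKeven : K % 2 = 0 := by
        by_contra h
        exact hodd (by rw [hmod]; simp; omega)
      by_cases hpal : ((PySem.List.pyRange 0 (PySem.Int.floordiv K 2) 1).all
          (fun i => PySem.List.pyGetD A i 0 == PySem.List.pyGetD A (K - 1 - i) 0)) = true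
      · rw [if_pos hpal, if_pos hpal,
            if_pos (show ((1 : Int) == 1) = true from by decide), dif_neg (by omega : ¬ K = 0)]
        exact ih _ _ (by omega) (by rw [hdiv]; omega)
      · rw [if_neg hpal, if_neg hpal,
            if_neg (show ¬ ((0 : Int) == 1) = true from by decide)]

-- ===== VERDICT (by name: the statement is the Claim_ definition above) =====
theorem minimumrequired_spec : Claim_equal_minimumrequired := by
  intro A N _ hPre
  unfold Spec_minimumrequired minimumrequired
  exact go_eq_alt A N.toNat N 0 le_rfl hPre.1
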